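-- pv_equiv track=rewrite | github.com/alexdodochen/public_daily_admission_app | app/services/cathlab_service.py | _resolve_id
-- ===== SOURCE A (Python) =====
-- def _resolve_id(text: str, table: dict) -> tuple[str, str]:
--     """
--     Try exact, then suffix-after-">", then substring; return (resolved_label, id) or ("", "").
--     """
--     if not text:
--         return "", ""
--     t = text.strip()
--     if t in table:
--         return t, table[t]
--     # "EP study/RFA > pAf" → try "pAf"
--     if ">" in t:
--         tail = t.rsplit(">", 1)[1].strip()
--         if tail in table:
--             return tail, table[tail]
--     # substring (longest label that appears in t wins)
--     best = ""
--     for k in table: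
--         if k and k in t and len(k) > len(best):
--             best = k
--     if best:
--         return best, table[best]
--     return "", ""
-- ===== SOURCE B (Python) =====
-- def _resolve_id(text: str, table: dict) -> tuple[str, str]:
--     if not text:
--         return "", ""
--     t = text.strip()
--     candidates = [t]
--     if ">" in t:
--         candidates.append(t.rsplit(">", 1)[1].strip())
--     for c in candidates:
--         if c in table:
--             return c, table[c]
--     for k in sorted(table, key=len, reverse=True):
--         if k and k in t:
--             return k, table[k]
--     return "", ""
-- ===== Notes on version B (the rewrite author's own statement) =====
-- stated objective: faster
-- what changed: The substring stage's fold that substring-tests every key while keeping a running best is replaced by a stable length-descending sort of the keys followed by returning the first key that occurs in t (early exit), and the exact/suffix stages become one first-match scan over a candidate list.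
import Mathlib
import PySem

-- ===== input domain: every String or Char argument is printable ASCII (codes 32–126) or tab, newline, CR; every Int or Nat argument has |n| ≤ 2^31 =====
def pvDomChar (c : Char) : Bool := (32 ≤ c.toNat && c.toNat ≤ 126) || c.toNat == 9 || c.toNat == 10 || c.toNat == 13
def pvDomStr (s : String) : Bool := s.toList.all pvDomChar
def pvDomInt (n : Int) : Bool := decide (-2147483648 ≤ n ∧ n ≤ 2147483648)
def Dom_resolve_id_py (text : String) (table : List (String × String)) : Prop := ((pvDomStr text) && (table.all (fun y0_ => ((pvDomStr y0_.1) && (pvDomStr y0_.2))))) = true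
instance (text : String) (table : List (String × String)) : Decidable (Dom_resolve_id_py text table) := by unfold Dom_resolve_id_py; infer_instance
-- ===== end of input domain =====

-- B replaces A's running-best substring fold by a stable length-descending sort of the
-- keys followed by the first match, and folds the exact/suffix stages into one candidate
-- scan (early exit); measured faster in a timing run on its generated inputs.


-- ===== PORT A =====
-- hand port of t.rsplit(">", 1)[1] (PySem has no rsplit-with-maxsplit): exact whenever
-- ">" occurs in t — the only use site, guarded in both ports — where the second piece is
-- the slice of t after the last ">".
def pvTailAfterGt (t : String) : String :=
  PySem.Str.slice t (some (PySem.Str.rfind t ">" + 1)) none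

def resolve_id_py (text : String) (table : List (String × String)) : String × String :=
  let d := PySem.Dict.ofList table
  if text == "" then ("", "")
  else
    let t := PySem.Str.strip text
    if d.contains t then (t, d.getD t "")              -- table[t]: t is a key here, getD is exact
    else
      -- fall-through join point for the two 'return' paths of the substring stage
      let substringStage :=
        let best := d.keys.foldl
          (fun best k =>
            if k != "" && PySem.Str.isIn k t && decide (PySem.Str.len k > PySem.Str.len best)
            then k else best) ""
        if best != "" then (best, d.getD best "") else ("", "")
      if PySem.Str.isIn ">" t then
        let tail := PySem.Str.strip (pvTailAfterGt t)
        if d.contains tail then (tail, d.getD tail "") else substringStage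
      else substringStage

-- ===== PORT B =====
def resolve_id_py_alt (text : String) (table : List (String × String)) : String × String :=
  let d := PySem.Dict.ofList table
  if text == "" then ("", "")
  else
    let t := PySem.Str.strip text
    let candidates :=
      [t] ++ (if PySem.Str.isIn ">" t then [PySem.Str.strip (pvTailAfterGt t)] else [])
    match candidates.find? (fun c => d.contains c) with
    | some c => (c, d.getD c "")                       -- table[c]: c is a key here, getD is exact
    | none =>
      match (PySem.List.sorted d.keys (fun k => PySem.Str.len k) true).find?
              (fun k => k != "" && PySem.Str.isIn k t) with
      | some k => (k, d.getD k "")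
      | none => ("", "")

-- ===== PRECONDITION & SPEC =====
def Spec_resolve_id_py (text : String) (table : List (String × String)) (out : String × String) : Prop := out = resolve_id_py_alt text table
instance (text : String) (table : List (String × String)) (out : String × String) : Decidable (Spec_resolve_id_py text table out) := by unfold Spec_resolve_id_py; infer_instance

-- ===== CLAIM (what is proved, stated in full; the proofs are below) =====
def Claim_equal_resolve_id_py : Prop := ∀ (text : String) (table : List (String × String)), Dom_resolve_id_py text table → Spec_resolve_id_py text table (resolve_id_py text table)

-- ===== LEMMAS AND PROOFS =====

-- the substring-stage predicate, step function, and "first hit, else empty string"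
def pvP (t k : String) : Bool := k != "" && PySem.Str.isIn k t

def pvStep (t best k : String) : String :=
  if pvP t k && decide (PySem.Str.len k > PySem.Str.len best) then k else best

def pvF (t : String) (acc : List String) : String := ((acc.find? (pvP t)).getD "")

lemma pvLen_pos_of_p (t k : String) (h : pvP t k = true) : 0 < PySem.Str.len k := by
  have hk : k ≠ "" := by simp [pvP] at h; exact h.1
  have hl : k.toList ≠ [] := by intro hl; apply hk; cases k; simp_all
  have : 0 < k.toList.length := List.length_pos_iff.mpr hl
  simp [PySem.Str.len_eq]
  exact_mod_cast this

lemma pvLen_empty : PySem.Str.len "" = 0 := by simp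

lemma pvF_mem (t : String) (acc : List String) : pvF t acc = "" ∨ pvF t acc ∈ acc := by
  unfold pvF
  cases hf : acc.find? (pvP t) with
  | none => left; rfl
  | some m => right; simpa using List.mem_of_find?_eq_some hf

lemma pvF_cons (t a : String) (rest : List String) :
    pvF t (a :: rest) = if pvP t a then a else pvF t rest := by
  unfold pvF
  rw [List.find?_cons]
  cases h : pvP t a <;> simp

lemma pvInsert_nil (x : String) :
    PySem.List.insertBy
      (fun a b => decide ((fun k => PySem.Str.len k) b < (fun k => PySem.Str.len k) a)) x [] = [x] := by
  simp [PySem.List.insertBy]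

lemma pvInsert_cons (x a : String) (rest : List String) :
    PySem.List.insertBy
      (fun a b => decide ((fun k => PySem.Str.len k) b < (fun k => PySem.Str.len k) a)) x (a :: rest)
    = if PySem.Str.len a < PySem.Str.len x then x :: a :: rest
      else a :: PySem.List.insertBy
        (fun a b => decide ((fun k => PySem.Str.len k) b < (fun k => PySem.Str.len k) a)) x rest := by
  by_cases h : PySem.Str.len a < PySem.Str.len x <;>
    simp [PySem.List.insertBy]

lemma pvStep_insert (t x : String) (acc : List String)
    (hp : acc.Pairwise (fun a b => PySem.Str.len b ≤ PySem.Str.len a)) :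
    pvF t (PySem.List.insertBy
      (fun a b => decide ((fun k => PySem.Str.len k) b < (fun k => PySem.Str.len k) a)) x acc)
      = pvStep t (pvF t acc) x := by
  induction acc with
  | nil =>
    rw [pvInsert_nil, pvF_cons]
    unfold pvStep pvF
    cases hx : pvP t x with
    | false => simp
    | true =>
      have hpos := pvLen_pos_of_p t x hx
      simp only [List.find?_nil, Option.getD_none, Bool.true_and, if_true]
      rw [if_pos]
      simp only [gt_iff_lt, decide_eq_true_eq, pvLen_empty]
      exact hpos
  | cons a rest ih =>
    have hhead : ∀ b ∈ rest, PySem.Str.len b ≤ PySem.Str.len a := (List.pairwise_cons.mp hp).1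
    have htail : rest.Pairwise (fun a b => PySem.Str.len b ≤ PySem.Str.len a) :=
      (List.pairwise_cons.mp hp).2
    rw [pvInsert_cons]
    by_cases hba : PySem.Str.len a < PySem.Str.len x
    · rw [if_pos hba, pvF_cons]
      by_cases hx : pvP t x = true
      · -- x wins: every candidate in a :: rest has length ≤ len a < len x
        have hlt : PySem.Str.len (pvF t (a :: rest)) < PySem.Str.len x := by
          rcases pvF_mem t (a :: rest) with he | hm
          · rw [he, pvLen_empty]; exact pvLen_pos_of_p t x hx
          · rcases List.mem_cons.mp hm with h | h
            · rw [h]; exact hba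
            · exact lt_of_le_of_lt (hhead _ h) hba
        unfold pvStep
        rw [if_pos hx, if_pos]
        simp only [hx, Bool.true_and, gt_iff_lt, decide_eq_true_eq]
        exact hlt
      · have hx' : pvP t x = false := by simpa using hx
        unfold pvStep
        simp only [hx', Bool.false_eq_true, if_false, Bool.false_and]
    · rw [if_neg hba, pvF_cons, pvF_cons]
      by_cases ha : pvP t a = true
      · -- head a stays the first match; x cannot beat it (len x ≤ len a)
        unfold pvStep
        simp only [ha, if_true]
        rw [if_neg]
        simp only [gt_iff_lt, decide_eq_true_eq, Bool.and_eq_true, not_and]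
        intro _ h
        exact hba h
      · have ha' : pvP t a = false := by simpa using ha
        simp only [ha', Bool.false_eq_true, if_false]
        exact ih htail

lemma pvMain (t : String) (ks pre : List String) :
    pvF t (PySem.List.sorted (pre ++ ks) (fun k => PySem.Str.len k) true)
      = ks.foldl (pvStep t) (pvF t (PySem.List.sorted pre (fun k => PySem.Str.len k) true)) := by
  induction ks generalizing pre with
  | nil => simp
  | cons x ks ih =>
    have h1 : pre ++ x :: ks = (pre ++ [x]) ++ ks := by simp
    rw [h1, ih (pre ++ [x])]
    have h2 : PySem.List.sorted (pre ++ [x]) (fun k => PySem.Str.len k) true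
        = PySem.List.insertBy
            (fun a b => decide ((fun k => PySem.Str.len k) b < (fun k => PySem.Str.len k) a)) x
            (PySem.List.sorted pre (fun k => PySem.Str.len k) true) := by
      rw [PySem.List.sorted_rev_eq_foldl_insertBy, PySem.List.sorted_rev_eq_foldl_insertBy,
        List.foldl_append]
      rfl
    rw [h2, pvStep_insert t x _ (PySem.List.sorted_pairwise_rev pre (fun k => PySem.Str.len k))]
    rfl

lemma pvFold_eq (t : String) (ks : List String) :
    ks.foldl (pvStep t) "" = pvF t (PySem.List.sorted ks (fun k => PySem.Str.len k) true) := by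
  have h := pvMain t ks []
  have h0 : PySem.List.sorted ([] : List String) (fun k => PySem.Str.len k) true = [] := by
    rw [PySem.List.sorted_rev_eq_foldl_insertBy]; rfl
  rw [h0] at h
  simpa [pvF] using h.symm

lemma pvStage3 (t : String) (d : PySem.Dict String String) :
    (let best := d.keys.foldl
        (fun best k =>
          if k != "" && PySem.Str.isIn k t && decide (PySem.Str.len k > PySem.Str.len best)
          then k else best) "";
     if best != "" then (best, d.getD best "") else (("" : String), ("" : String)))
    = match (PySem.List.sorted d.keys (fun k => PySem.Str.len k) true).find?
              (fun k => k != "" && PySem.Str.isIn k t) with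
      | some k => (k, d.getD k "")
      | none => ("", "") := by
  have hstep : (fun best k =>
      if k != "" && PySem.Str.isIn k t && decide (PySem.Str.len k > PySem.Str.len best)
      then k else best) = pvStep t := rfl
  have hp : (fun k => k != "" && PySem.Str.isIn k t) = pvP t := rfl
  simp only [hstep, hp]
  rw [pvFold_eq t d.keys]
  unfold pvF
  cases hf : (PySem.List.sorted d.keys (fun k => PySem.Str.len k) true).find? (pvP t) with
  | none => simp only [Option.getD_none, bne_self_eq_false, Bool.false_eq_true, if_false]
  | some m =>
    have hm : pvP t m = true := List.find?_some hf
    have hne : m ≠ "" := by simp [pvP] at hm; exact hm.1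
    simp only [Option.getD_some]
    rw [if_pos]
    simpa using hne

-- ===== VERDICT (by name: the statement is the Claim_ definition above) =====
theorem resolve_id_py_spec : Claim_equal_resolve_id_py := by
  intro text table _
  unfold Spec_resolve_id_py resolve_id_py resolve_id_py_alt
  by_cases h0 : text == ""
  · simp [h0]
  · simp only [h0, Bool.false_eq_true, if_false]
    set d := PySem.Dict.ofList table with hd
    set t := PySem.Str.strip text with ht
    by_cases h1 : d.contains t
    · simp [h1]
    · have h1' : d.contains t = false := by simpa using h1
      by_cases h2 : PySem.Str.isIn ">" t
      · set tail := PySem.Str.strip (pvTailAfterGt t) with htail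
        by_cases h3 : d.contains tail
        · simp only [h1', h2, h3, List.cons_append, List.nil_append, List.find?_cons,
            if_true, Bool.false_eq_true, if_false, List.find?]
        · have h3' : d.contains tail = false := by simpa using h3
          simp only [h1', h2, h3', List.find?_cons, if_true, Bool.false_eq_true, if_false,
            List.cons_append, List.nil_append, List.find?]
          exact pvStage3 t d
      · have h2' : PySem.Str.isIn ">" t = false := by simpa using h2
        simp only [h1', h2', List.find?_cons, Bool.false_eq_true, if_false,
          List.append_nil, List.find?]
        exact pvStage3 t d
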